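-- pv_equiv track=rewrite | github.com/qreoct/aoc | 2020/day19.py | simplify_pattern
-- ===== SOURCE A (Python) =====
-- from itertools import product
--
-- def simplify_pattern(rulelist, idx):
--     val = rulelist[idx]
--     if not any(c.isdigit() for c in val):
--         yield val
--     else:
--         variations = val.split(' | ')
--         for v in variations:
--             res = [simplify_pattern(rulelist, int(i)) for i in v.split(' ')] # recursively get the strings which match the inner patterns
--             combinations = product(*res) # then cartesian product together. e.g. 3: "a" 4: "b" 0: 3 4 | 4 3 so combinations is a generator of [ a b, b a ]
--             # in larger examples, cartesian product of rule 3 and 4 will include all possibilities for rule 3 and 4, if they are large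
--             for combi in combinations:
--                 yield ''.join(combi)
-- ===== SOURCE B (Python) =====
-- def simplify_pattern(rulelist, idx):
--     memo = {}
--     def go(i):
--         if i in memo:
--             return memo[i]
--         val = rulelist[i]
--         if not any(c.isdigit() for c in val):
--             res = [val]
--         else:
--             res = []
--             for v in val.split(' | '):
--                 combos = ['']
--                 for t in v.split(' '):
--                     p = go(int(t))
--                     combos = [c + s for c in combos for s in p]
--                 res.extend(combos)
--         memo[i] = res
--         return res
--     return go(idx)
-- ===== Notes on version B (the rewrite author's own statement) =====
-- stated objective: alternative
-- what changed: A enumerates a rule's strings by naive top-down recursion, recomputing every referenced sub-rule at each reference; B memoizes the recursion in a per-rule-index dictionary so each rule's string list is computed exactly once and reused across references.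
import Mathlib
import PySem

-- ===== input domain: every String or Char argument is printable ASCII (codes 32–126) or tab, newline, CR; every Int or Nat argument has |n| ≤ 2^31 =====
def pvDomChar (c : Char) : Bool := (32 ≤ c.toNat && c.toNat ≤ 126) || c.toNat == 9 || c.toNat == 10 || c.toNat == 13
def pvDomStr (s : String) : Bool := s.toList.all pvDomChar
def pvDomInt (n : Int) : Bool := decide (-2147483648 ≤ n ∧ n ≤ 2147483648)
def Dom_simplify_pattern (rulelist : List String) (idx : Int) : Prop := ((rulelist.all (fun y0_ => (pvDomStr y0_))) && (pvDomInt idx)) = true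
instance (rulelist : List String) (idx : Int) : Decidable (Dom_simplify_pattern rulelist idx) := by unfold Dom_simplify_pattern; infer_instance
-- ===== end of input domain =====

-- B replaces A's naive re-recursing enumeration by a memoized recursion: a dictionary of
-- per-rule-index string lists is threaded through, so every rule's list is computed once.

-- ===== PORT A =====
-- s.split(sep) with a non-empty separator (never raises)
def pvSplit (s sep : String) : List String := (PySem.Str.split? s sep).getD []

-- itertools.product(*res) (library call): lexicographic order, rightmost varies fastest
def pvProduct : List (List String) → List (List String)
  | [] => [[]]
  | l :: ls => l.flatMap (fun x => (pvProduct ls).map (fun rest => x :: rest))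

-- ''.join(combi)
def pvJoin (l : List String) : String := PySem.Str.join "" l

-- any(c.isdigit() for c in val)
def pvHasDigit (val : String) : Bool := val.toList.any PySem.Chars.isdigit

-- A is recursive; fuel = rulelist.length + 1 suffices on Pre_ (reference chains repeat no rule)
def simplify_pattern_fuel (rulelist : List String) : Nat → Int → List String
  | 0, _ => []
  | Nat.succ fuel, idx =>
    let val := PySem.List.pyGetD rulelist idx ""      -- rulelist[idx]; IndexError excluded by Pre_
    if pvHasDigit val = false then [val]
    else
      (pvSplit val " | ").flatMap (fun v =>
        let res := (pvSplit v " ").map (fun t =>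
          simplify_pattern_fuel rulelist fuel ((PySem.Int.ofStr? t).getD 0))   -- int(t); ValueError excluded by Pre_
        (pvProduct res).map pvJoin)

def simplify_pattern (rulelist : List String) (idx : Int) : List String :=
  simplify_pattern_fuel rulelist (rulelist.length + 1) idx

-- ===== PORT B =====
-- go(i) with the memo dict threaded through explicitly; returns (result, memo)
def pvGo (rulelist : List String) : Nat → PySem.Dict Int (List String) → Int → (List String × PySem.Dict Int (List String))
  | 0, memo, _ => ([], memo)
  | Nat.succ fuel, memo, i =>
    match memo.get? i with
    | some res => (res, memo)      -- if i in memo: return memo[i]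
    | none =>
      let val := PySem.List.pyGetD rulelist i ""      -- rulelist[i]; IndexError excluded by Pre_
      if pvHasDigit val = false then ([val], memo.insert i [val])
      else
        -- res = []; for v in variations: combos = ['']; for t: p = go(int(t)); combos = [c+s ...]; res.extend(combos)
        let st := (pvSplit val " | ").foldl (fun (st : List String × PySem.Dict Int (List String)) v =>
          let st2 := (pvSplit v " ").foldl (fun (st2 : List String × PySem.Dict Int (List String)) t =>
            let pr := pvGo rulelist fuel st2.2 ((PySem.Int.ofStr? t).getD 0)
            (st2.1.flatMap (fun c => pr.1.map (fun s => c ++ s)), pr.2)) ([""], st.2)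
          (st.1 ++ st2.1, st2.2)) ([], memo)
        (st.1, st.2.insert i st.1)

def simplify_pattern_alt (rulelist : List String) (idx : Int) : List String :=
  (pvGo rulelist (rulelist.length + 1) PySem.Dict.empty idx).1

-- ===== PRECONDITION & SPEC =====
-- rulelist[i] succeeds exactly when -(n) ≤ i < n; its normalized index (as Python computes it)
def pvValid (n : Nat) (i : Int) : Bool := decide (-(n : Int) ≤ i ∧ i < (n : Int))
def pvNorm (n : Nat) (i : Int) : Nat := if 0 ≤ i then i.toNat else n - (-i).toNat

-- the tokens of a rule string, and the rule-reference graph they induce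
def pvTokens (r : String) : List String := (pvSplit r " | ").flatMap (fun v => pvSplit v " ")

def pvSuccs (rulelist : List String) (j : Nat) : List Nat :=
  if pvHasDigit (rulelist.getD j "") = false then []
  else (pvTokens (rulelist.getD j "")).filterMap (fun t =>
    match PySem.Int.ofStr? t with
    | some k => if pvValid rulelist.length k then some (pvNorm rulelist.length k) else none
    | none => none)

-- every token of rule j parses as an int and indexes the list
def pvRuleOK (rulelist : List String) (j : Nat) : Bool :=
  !pvHasDigit (rulelist.getD j "") || (pvTokens (rulelist.getD j "")).all (fun t =>
    match PySem.Int.ofStr? t with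
    | some k => pvValid rulelist.length k
    | none => false)

-- reachable rule indices: close {j} under pvSuccs (saturates within length+1 rounds)
def pvStep (rulelist : List String) (S : Finset Nat) : Finset Nat :=
  S ∪ S.biUnion (fun j => (pvSuccs rulelist j).toFinset)
def pvRset (rulelist : List String) (j : Nat) : Finset Nat :=
  (pvStep rulelist)^[rulelist.length + 1] {j}

-- Pre_ excludes exactly the inputs on which A raises or never returns: an out-of-range start
-- index (IndexError), or — when the start rule contains a digit — a reachable rule with a token
-- that fails int() or indexes out of range (ValueError/IndexError when the generator is
-- consumed), or a cycle in the reachable part of the reference graph (infinite recursion).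
def Pre_simplify_pattern (rulelist : List String) (idx : Int) : Prop :=
  pvValid rulelist.length idx = true ∧
  (pvHasDigit (rulelist.getD (pvNorm rulelist.length idx) "") = true →
    ∀ j ∈ pvRset rulelist (pvNorm rulelist.length idx),
      pvRuleOK rulelist j = true ∧ ∀ k ∈ pvSuccs rulelist j, j ∉ pvRset rulelist k)

instance (rulelist : List String) (idx : Int) : Decidable (Pre_simplify_pattern rulelist idx) := by
  unfold Pre_simplify_pattern; infer_instance

def pvWitness_simplify_pattern : List String × Int := (["1 2 | 2 1", "a", "b"], 0)

def Spec_simplify_pattern (rulelist : List String) (idx : Int) (out : List String) : Prop :=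
  out = simplify_pattern_alt rulelist idx
instance (rulelist : List String) (idx : Int) (out : List String) : Decidable (Spec_simplify_pattern rulelist idx out) := by
  unfold Spec_simplify_pattern; infer_instance

-- ===== CLAIM (what is proved, stated in full; the proofs are below) =====
def Claim_equal_simplify_pattern : Prop := ∀ (rulelist : List String) (idx : Int), Dom_simplify_pattern rulelist idx → Pre_simplify_pattern rulelist idx → Spec_simplify_pattern rulelist idx (simplify_pattern rulelist idx)

-- ===== LEMMAS AND PROOFS =====

-- pvGood j: all rules reachable from j are well-formed and no reachable rule lies on a cycle
def pvGood (rulelist : List String) (j : Nat) : Prop :=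
  ∀ m ∈ pvRset rulelist j, pvRuleOK rulelist m = true ∧ ∀ k ∈ pvSuccs rulelist m, m ∉ pvRset rulelist k

theorem pvNorm_lt (n : Nat) (i : Int) (h : pvValid n i = true) : pvNorm n i < n := by
  simp [pvValid] at h
  unfold pvNorm
  split_ifs with h0 <;> omega

theorem pvGetD_eq (rulelist : List String) (i : Int) (h : pvValid rulelist.length i = true) :
    PySem.List.pyGetD rulelist i "" = rulelist.getD (pvNorm rulelist.length i) "" := by
  simp only [pvValid, decide_eq_true_eq] at h
  unfold PySem.List.pyGetD PySem.List.pyGet? PySem.List.pyIdx? pvNorm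
  by_cases h0 : 0 ≤ i
  · have : i < (rulelist.length : Int) := h.2
    simp [h0, this, List.getD]
  · have : -(rulelist.length : Int) ≤ i := h.1
    simp [h0, this, List.getD]

theorem pvTok (rulelist : List String) (j : Nat)
    (hok : pvRuleOK rulelist j = true)
    (hd : pvHasDigit (rulelist.getD j "") = true)
    {v t : String} (hv : v ∈ pvSplit (rulelist.getD j "") " | ") (ht : t ∈ pvSplit v " ") :
    ∃ k : Int, PySem.Int.ofStr? t = some k ∧ pvValid rulelist.length k = true ∧
      pvNorm rulelist.length k ∈ pvSuccs rulelist j := by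
  have htk : t ∈ pvTokens (rulelist.getD j "") := List.mem_flatMap.mpr ⟨v, hv, ht⟩
  unfold pvRuleOK at hok
  rw [Bool.or_eq_true] at hok
  rcases hok with hok | hok
  · rw [Bool.not_eq_true'] at hok
    simp only [List.getD_eq_getElem?_getD] at hok hd
    rw [hok] at hd
    exact absurd hd (by simp)
  · have := (List.all_eq_true.mp hok) t htk
    cases hk : PySem.Int.ofStr? t with
    | none => rw [hk] at this; simp at this
    | some k =>
        rw [hk] at this; simp at this
        refine ⟨k, rfl, this, ?_⟩
        unfold pvSuccs
        simp only [hd, Bool.true_eq_false, if_false]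
        exact List.mem_filterMap.mpr ⟨t, htk, by simp [hk, this]⟩

-- basic reachability facts
theorem pvSubset_step (rulelist : List String) (S : Finset Nat) : S ⊆ pvStep rulelist S :=
  Finset.subset_union_left

theorem pvSuccs_lt (rulelist : List String) (j : Nat) :
    ∀ k ∈ pvSuccs rulelist j, k < rulelist.length := by
  intro k hk
  unfold pvSuccs at hk
  split_ifs at hk with hd
  · simp at hk
  · obtain ⟨t, _, hmt⟩ := List.mem_filterMap.mp hk
    cases hs : PySem.Int.ofStr? t with
    | none =>
        simp only [hs] at hmt
        cases hmt
    | some m =>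
        simp only [hs] at hmt
        split_ifs at hmt with hvb
        · obtain rfl : pvNorm rulelist.length m = k := Option.some.inj hmt
          exact pvNorm_lt _ _ hvb

theorem pvIter_bound (rulelist : List String) (j : Nat) (m : Nat) :
    (pvStep rulelist)^[m] {j} ⊆ insert j (Finset.range rulelist.length) := by
  induction m with
  | zero => simp
  | succ m ih =>
      rw [Function.iterate_succ_apply']
      intro x hx
      rcases Finset.mem_union.mp hx with hx | hx
      · exact ih hx
      · obtain ⟨a, _, hxa⟩ := Finset.mem_biUnion.mp hx
        exact Finset.mem_insert_of_mem (Finset.mem_range.mpr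
          (pvSuccs_lt rulelist a x (List.mem_toFinset.mp hxa)))

theorem pvIter_self (rulelist : List String) (j : Nat) (m : Nat) :
    j ∈ (pvStep rulelist)^[m] {j} := by
  induction m with
  | zero => simp
  | succ m ih =>
      rw [Function.iterate_succ_apply']
      exact pvSubset_step rulelist _ ih

theorem pvMem_Rset_self (rulelist : List String) (j : Nat) : j ∈ pvRset rulelist j :=
  pvIter_self rulelist j _

theorem pvRset_fix (rulelist : List String) (j : Nat) :
    pvStep rulelist (pvRset rulelist j) = pvRset rulelist j := by
  -- the iterates grow until a fixpoint; within length+1 rounds one is reached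
  have hgrow : ∀ m : Nat, (∀ m' < m, pvStep rulelist ((pvStep rulelist)^[m'] {j}) ≠ (pvStep rulelist)^[m'] {j}) →
      m + 1 ≤ ((pvStep rulelist)^[m] {j}).card := by
    intro m
    induction m with
    | zero => intro _; simp
    | succ m ih =>
        intro h
        have h1 : m + 1 ≤ ((pvStep rulelist)^[m] {j}).card :=
          ih (fun m' hm' => h m' (Nat.lt_succ_of_lt hm'))
        have hss : (pvStep rulelist)^[m] {j} ⊂ (pvStep rulelist)^[m+1] {j} := by
          rw [Function.iterate_succ_apply']
          exact (Finset.ssubset_iff_subset_ne.mpr ⟨pvSubset_step rulelist _, (h m (Nat.lt_succ_self m)).symm⟩)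
        have := Finset.card_lt_card hss
        omega
  have hex : ∃ m, m ≤ rulelist.length ∧
      pvStep rulelist ((pvStep rulelist)^[m] {j}) = (pvStep rulelist)^[m] {j} := by
    by_contra hno
    push Not at hno
    have : rulelist.length + 1 + 1 ≤ ((pvStep rulelist)^[rulelist.length + 1] {j}).card := by
      apply hgrow
      intro m' hm'
      exact hno m' (by omega)
    have hb := Finset.card_le_card (pvIter_bound rulelist j (rulelist.length + 1))
    have : ((insert j (Finset.range rulelist.length)).card) ≤ rulelist.length + 1 := by
      calc (insert j (Finset.range rulelist.length)).card
          ≤ (Finset.range rulelist.length).card + 1 := Finset.card_insert_le _ _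
        _ = rulelist.length + 1 := by simp
    omega
  obtain ⟨m, hm, hfix⟩ := hex
  have hstay : ∀ p : Nat, (pvStep rulelist)^[m + p] {j} = (pvStep rulelist)^[m] {j} := by
    intro p
    induction p with
    | zero => rfl
    | succ p ih =>
        have : m + (p + 1) = (m + p) + 1 := by omega
        rw [this, Function.iterate_succ_apply', ih, hfix]
  have h1 : pvRset rulelist j = (pvStep rulelist)^[m] {j} := by
    unfold pvRset
    have : rulelist.length + 1 = m + (rulelist.length + 1 - m) := by omega
    rw [this, hstay]
  rw [h1, hfix]

theorem pvRset_least (rulelist : List String) (j : Nat) (T : Finset Nat) (hj : j ∈ T)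
    (hcl : ∀ a ∈ T, ∀ k ∈ pvSuccs rulelist a, k ∈ T) : pvRset rulelist j ⊆ T := by
  have : ∀ m : Nat, (pvStep rulelist)^[m] {j} ⊆ T := by
    intro m
    induction m with
    | zero => simpa using hj
    | succ m ih =>
        rw [Function.iterate_succ_apply']
        intro x hx
        rcases Finset.mem_union.mp hx with hx | hx
        · exact ih hx
        · obtain ⟨a, ha, hxa⟩ := Finset.mem_biUnion.mp hx
          exact hcl a (ih ha) x (List.mem_toFinset.mp hxa)
  exact this _

theorem pvSuccs_subset_Rset (rulelist : List String) {j k : Nat} (hk : k ∈ pvRset rulelist j) :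
    ∀ s ∈ pvSuccs rulelist k, s ∈ pvRset rulelist j := by
  intro s hs
  have := pvRset_fix rulelist j
  rw [← this]
  exact Finset.mem_union_right _ (Finset.mem_biUnion.mpr ⟨k, hk, List.mem_toFinset.mpr hs⟩)

theorem pvRset_trans (rulelist : List String) {j k : Nat} (hk : k ∈ pvRset rulelist j) :
    pvRset rulelist k ⊆ pvRset rulelist j :=
  pvRset_least rulelist k _ hk (fun a ha => pvSuccs_subset_Rset rulelist ha)

theorem pvCard_lt (rulelist : List String) {j k : Nat} (hk : k ∈ pvSuccs rulelist j)
    (hacyc : j ∉ pvRset rulelist k) :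
    (pvRset rulelist k).card < (pvRset rulelist j).card := by
  have hkj : k ∈ pvRset rulelist j :=
    pvSuccs_subset_Rset rulelist (pvMem_Rset_self rulelist j) k hk
  have hsub : pvRset rulelist k ⊆ pvRset rulelist j := pvRset_trans rulelist hkj
  exact Finset.card_lt_card (Finset.ssubset_iff_of_subset hsub |>.mpr
    ⟨j, pvMem_Rset_self rulelist j, hacyc⟩)

theorem pvGood_mono (rulelist : List String) {j k : Nat} (hg : pvGood rulelist j)
    (hk : k ∈ pvRset rulelist j) : pvGood rulelist k :=
  fun m hm => hg m (pvRset_trans rulelist hk hm)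

theorem pvRset_card_le (rulelist : List String) {j : Nat} (hj : j < rulelist.length) :
    (pvRset rulelist j).card ≤ rulelist.length := by
  have h := pvIter_bound rulelist j (rulelist.length + 1)
  have : insert j (Finset.range rulelist.length) = Finset.range rulelist.length := by
    simp [hj]
  rw [this] at h
  simpa using Finset.card_le_card h

-- joining strings, and B's combos loop against A's product
theorem pvJoin_cons (x : String) (rest : List String) : pvJoin (x :: rest) = x ++ pvJoin rest := by
  apply String.toList_inj.mp
  cases rest with
  | nil => simp [pvJoin, PySem.Str.toList_join, String.toList_append, PySem.Chars.join, List.intercalate]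
  | cons y ys => simp [pvJoin, PySem.Str.toList_join, String.toList_append, PySem.Chars.join_cons_cons]

theorem pv_combos_gen (g : String → List String) (ts : List String) (acc : List String) :
    ts.foldl (fun combos t => combos.flatMap (fun c => (g t).map (fun s => c ++ s))) acc
      = acc.flatMap (fun c => ((pvProduct (ts.map g)).map pvJoin).map (fun s => c ++ s)) := by
  induction ts generalizing acc with
  | nil => simp [pvProduct, pvJoin, PySem.Str.join, PySem.Chars.join, List.intercalate]
  | cons t ts ih =>
      rw [List.foldl_cons, ih]
      simp only [List.map_cons, pvProduct, List.map_flatMap, List.map_map, Function.comp_def,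
        pvJoin_cons]
      simp [List.flatMap_assoc, List.flatMap_map, String.append_assoc]

theorem pv_combos (g : String → List String) (ts : List String) :
    ts.foldl (fun combos t => combos.flatMap (fun c => (g t).map (fun s => c ++ s))) [""]
      = (pvProduct (ts.map g)).map pvJoin := by
  rw [pv_combos_gen]
  simp [String.empty_append]

theorem pvA_succ (rulelist : List String) (g : Nat) (i : Int) :
    simplify_pattern_fuel rulelist (g + 1) i =
      if pvHasDigit (PySem.List.pyGetD rulelist i "") = false then [PySem.List.pyGetD rulelist i ""]
      else (pvSplit (PySem.List.pyGetD rulelist i "") " | ").flatMap (fun v =>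
        (pvProduct ((pvSplit v " ").map (fun t =>
          simplify_pattern_fuel rulelist g ((PySem.Int.ofStr? t).getD 0)))).map pvJoin) := by
  rw [simplify_pattern_fuel]

-- A's fuelled recursion is fuel-independent once the fuel covers the reachable-set size
theorem pvA_fuel (rulelist : List String) :
    ∀ c : Nat, ∀ (i : Int), pvValid rulelist.length i = true →
      pvGood rulelist (pvNorm rulelist.length i) →
      (pvRset rulelist (pvNorm rulelist.length i)).card ≤ c →
      ∀ f1 f2 : Nat, (pvRset rulelist (pvNorm rulelist.length i)).card ≤ f1 →
        (pvRset rulelist (pvNorm rulelist.length i)).card ≤ f2 →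
        simplify_pattern_fuel rulelist f1 i = simplify_pattern_fuel rulelist f2 i := by
  intro c
  induction c with
  | zero =>
      intro i _ _ hc
      have := Finset.card_pos.mpr ⟨_, pvMem_Rset_self rulelist (pvNorm rulelist.length i)⟩
      omega
  | succ c ih =>
      intro i hval hgood hc f1 f2 hf1 hf2
      have hpos := Finset.card_pos.mpr ⟨_, pvMem_Rset_self rulelist (pvNorm rulelist.length i)⟩
      obtain ⟨g1, rfl⟩ : ∃ g, f1 = g + 1 := ⟨f1 - 1, by omega⟩
      obtain ⟨g2, rfl⟩ : ∃ g, f2 = g + 1 := ⟨f2 - 1, by omega⟩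
      have hv := pvGetD_eq rulelist i hval
      cases hb : pvHasDigit (PySem.List.pyGetD rulelist i "") with
      | false => simp [simplify_pattern_fuel, hb]
      | true =>
          simp only [simplify_pattern_fuel, hb, Bool.true_eq_false, if_false]
          apply List.flatMap_congr
          intro v hv'
          congr 1
          congr 1
          apply List.map_congr_left
          intro t ht
          have hself := hgood _ (pvMem_Rset_self rulelist (pvNorm rulelist.length i))
          rw [hv] at hb hv'
          obtain ⟨k, hk, hkval, hksucc⟩ := pvTok rulelist _ hself.1 hb hv' ht
          rw [hk]
          simp only [Option.getD_some]
          have hkmem : pvNorm rulelist.length k ∈ pvRset rulelist (pvNorm rulelist.length i) :=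
            pvSuccs_subset_Rset rulelist (pvMem_Rset_self rulelist _) _ hksucc
          have hcard : (pvRset rulelist (pvNorm rulelist.length k)).card <
              (pvRset rulelist (pvNorm rulelist.length i)).card :=
            pvCard_lt rulelist hksucc (hself.2 _ hksucc)
          exact ih k hkval (pvGood_mono rulelist hgood hkmem) (by omega) g1 g2 (by omega) (by omega)

theorem pvGo_succ (rulelist : List String) (g : Nat) (memo : PySem.Dict Int (List String)) (i : Int) :
    pvGo rulelist (g + 1) memo i =
      match memo.get? i with
      | some res => (res, memo)
      | none =>
        let val := PySem.List.pyGetD rulelist i ""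
        if pvHasDigit val = false then ([val], memo.insert i [val])
        else
          let st := (pvSplit val " | ").foldl (fun (st : List String × PySem.Dict Int (List String)) v =>
            let st2 := (pvSplit v " ").foldl (fun (st2 : List String × PySem.Dict Int (List String)) t =>
              let pr := pvGo rulelist g st2.2 ((PySem.Int.ofStr? t).getD 0)
              (st2.1.flatMap (fun c => pr.1.map (fun s => c ++ s)), pr.2)) ([""], st.2)
            (st.1 ++ st2.1, st2.2)) ([], memo)
          (st.1, st.2.insert i st.1) := by
  rw [pvGo]

-- B's memo invariant: every entry is A's value at its key, a key A can reach
def pvInv (rulelist : List String) (j0 : Nat) (memo : PySem.Dict Int (List String)) : Prop :=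
  ∀ (k : Int) (res : List String), memo.get? k = some res →
    pvValid rulelist.length k = true ∧ pvNorm rulelist.length k ∈ pvRset rulelist j0 ∧
    res = simplify_pattern_fuel rulelist (rulelist.length + 1) k

-- B's inner token loop computes the pure product fold and preserves the memo invariant
theorem pvB_tokfold (rulelist : List String) (j0 : Nat) (g c : Nat)
    (H : ∀ (i : Int) (memo : PySem.Dict Int (List String)), pvInv rulelist j0 memo →
      pvValid rulelist.length i = true → pvNorm rulelist.length i ∈ pvRset rulelist j0 →
      (pvRset rulelist (pvNorm rulelist.length i)).card ≤ c →
      (pvRset rulelist (pvNorm rulelist.length i)).card ≤ g →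
      (pvGo rulelist g memo i).1 = simplify_pattern_fuel rulelist (rulelist.length + 1) i ∧
      pvInv rulelist j0 (pvGo rulelist g memo i).2) :
    ∀ (ts combos : List String) (memo : PySem.Dict Int (List String)), pvInv rulelist j0 memo →
      (∀ t ∈ ts, ∃ k : Int, PySem.Int.ofStr? t = some k ∧ pvValid rulelist.length k = true ∧
        pvNorm rulelist.length k ∈ pvRset rulelist j0 ∧
        (pvRset rulelist (pvNorm rulelist.length k)).card ≤ c ∧
        (pvRset rulelist (pvNorm rulelist.length k)).card ≤ g) →
      (ts.foldl (fun (st2 : List String × PySem.Dict Int (List String)) t =>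
          let pr := pvGo rulelist g st2.2 ((PySem.Int.ofStr? t).getD 0)
          (st2.1.flatMap (fun c => pr.1.map (fun s => c ++ s)), pr.2)) (combos, memo)).1
        = ts.foldl (fun combos t => combos.flatMap (fun c =>
            (simplify_pattern_fuel rulelist (rulelist.length + 1)
              ((PySem.Int.ofStr? t).getD 0)).map (fun s => c ++ s))) combos
      ∧ pvInv rulelist j0 (ts.foldl (fun (st2 : List String × PySem.Dict Int (List String)) t =>
          let pr := pvGo rulelist g st2.2 ((PySem.Int.ofStr? t).getD 0)
          (st2.1.flatMap (fun c => pr.1.map (fun s => c ++ s)), pr.2)) (combos, memo)).2 := by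
  intro ts
  induction ts with
  | nil => intro combos memo hinv _; exact ⟨rfl, hinv⟩
  | cons t ts iht =>
      intro combos memo hinv hts
      obtain ⟨k, hk, hkval, hkj0, hkc, hkg⟩ := hts t (List.mem_cons_self)
      simp only [List.foldl_cons]
      obtain ⟨h1, h2⟩ := H ((PySem.Int.ofStr? t).getD 0) memo hinv
        (by rw [hk]; exact hkval) (by rw [hk]; exact hkj0)
        (by rw [hk]; exact hkc) (by rw [hk]; exact hkg)
      obtain ⟨ih1, ih2⟩ := iht
        (combos.flatMap (fun c => (pvGo rulelist g memo ((PySem.Int.ofStr? t).getD 0)).1.map (fun s => c ++ s)))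
        (pvGo rulelist g memo ((PySem.Int.ofStr? t).getD 0)).2 h2
        (fun t' ht' => hts t' (List.mem_cons_of_mem _ ht'))
      refine ⟨?_, ih2⟩
      rw [ih1, h1]

-- B's variation loop: out grows by the pure combos of each variation; memo invariant preserved
theorem pvB_varfold (rulelist : List String) (j0 : Nat) (g c : Nat)
    (H : ∀ (i : Int) (memo : PySem.Dict Int (List String)), pvInv rulelist j0 memo →
      pvValid rulelist.length i = true → pvNorm rulelist.length i ∈ pvRset rulelist j0 →
      (pvRset rulelist (pvNorm rulelist.length i)).card ≤ c →
      (pvRset rulelist (pvNorm rulelist.length i)).card ≤ g →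
      (pvGo rulelist g memo i).1 = simplify_pattern_fuel rulelist (rulelist.length + 1) i ∧
      pvInv rulelist j0 (pvGo rulelist g memo i).2) :
    ∀ (vs : List String) (out : List String) (memo : PySem.Dict Int (List String)), pvInv rulelist j0 memo →
      (∀ v ∈ vs, ∀ t ∈ pvSplit v " ", ∃ k : Int, PySem.Int.ofStr? t = some k ∧
        pvValid rulelist.length k = true ∧ pvNorm rulelist.length k ∈ pvRset rulelist j0 ∧
        (pvRset rulelist (pvNorm rulelist.length k)).card ≤ c ∧
        (pvRset rulelist (pvNorm rulelist.length k)).card ≤ g) →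
      (vs.foldl (fun (st : List String × PySem.Dict Int (List String)) v =>
          let st2 := (pvSplit v " ").foldl (fun (st2 : List String × PySem.Dict Int (List String)) t =>
            let pr := pvGo rulelist g st2.2 ((PySem.Int.ofStr? t).getD 0)
            (st2.1.flatMap (fun c => pr.1.map (fun s => c ++ s)), pr.2)) ([""], st.2)
          (st.1 ++ st2.1, st2.2)) (out, memo)).1
        = out ++ vs.flatMap (fun v => (pvSplit v " ").foldl (fun combos t => combos.flatMap (fun c =>
            (simplify_pattern_fuel rulelist (rulelist.length + 1)
              ((PySem.Int.ofStr? t).getD 0)).map (fun s => c ++ s))) [""])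
      ∧ pvInv rulelist j0 (vs.foldl (fun (st : List String × PySem.Dict Int (List String)) v =>
          let st2 := (pvSplit v " ").foldl (fun (st2 : List String × PySem.Dict Int (List String)) t =>
            let pr := pvGo rulelist g st2.2 ((PySem.Int.ofStr? t).getD 0)
            (st2.1.flatMap (fun c => pr.1.map (fun s => c ++ s)), pr.2)) ([""], st.2)
          (st.1 ++ st2.1, st2.2)) (out, memo)).2 := by
  intro vs
  induction vs with
  | nil => intro out memo hinv _; exact ⟨by simp, hinv⟩
  | cons v vs ihv =>
      intro out memo hinv hvs
      simp only [List.foldl_cons]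
      obtain ⟨h1, h2⟩ := pvB_tokfold rulelist j0 g c H (pvSplit v " ") [""] memo hinv
        (hvs v (List.mem_cons_self))
      obtain ⟨ih1, ih2⟩ := ihv
        (out ++ ((pvSplit v " ").foldl (fun (st2 : List String × PySem.Dict Int (List String)) t =>
          let pr := pvGo rulelist g st2.2 ((PySem.Int.ofStr? t).getD 0)
          (st2.1.flatMap (fun c => pr.1.map (fun s => c ++ s)), pr.2)) ([""], memo)).1)
        ((pvSplit v " ").foldl (fun (st2 : List String × PySem.Dict Int (List String)) t =>
          let pr := pvGo rulelist g st2.2 ((PySem.Int.ofStr? t).getD 0)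
          (st2.1.flatMap (fun c => pr.1.map (fun s => c ++ s)), pr.2)) ([""], memo)).2 h2
        (fun v' hv' => hvs v' (List.mem_cons_of_mem _ hv'))
      refine ⟨?_, ih2⟩
      rw [ih1, h1]
      simp [List.flatMap_cons, List.append_assoc]

theorem pvB_go (rulelist : List String) (j0 : Nat) (hgood : pvGood rulelist j0) :
    ∀ c : Nat, ∀ (i : Int) (memo : PySem.Dict Int (List String)), pvInv rulelist j0 memo →
      pvValid rulelist.length i = true → pvNorm rulelist.length i ∈ pvRset rulelist j0 →
      (pvRset rulelist (pvNorm rulelist.length i)).card ≤ c →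
      ∀ f : Nat, (pvRset rulelist (pvNorm rulelist.length i)).card ≤ f →
        (pvGo rulelist f memo i).1 = simplify_pattern_fuel rulelist (rulelist.length + 1) i ∧
        pvInv rulelist j0 (pvGo rulelist f memo i).2 := by
  intro c
  induction c with
  | zero =>
      intro i _ _ _ _ hc
      have := Finset.card_pos.mpr ⟨_, pvMem_Rset_self rulelist (pvNorm rulelist.length i)⟩
      omega
  | succ c ih =>
      intro i memo hinv hval hmemj0 hc f hf
      have hpos := Finset.card_pos.mpr ⟨_, pvMem_Rset_self rulelist (pvNorm rulelist.length i)⟩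
      obtain ⟨g, rfl⟩ : ∃ g, f = g + 1 := ⟨f - 1, by omega⟩
      rw [pvGo_succ]
      cases hmem : memo.get? i with
      | some res =>
          obtain ⟨_, _, hres⟩ := hinv _ _ hmem
          exact ⟨hres, hinv⟩
      | none =>
          have hv := pvGetD_eq rulelist i hval
          have hself := hgood _ hmemj0
          dsimp only
          cases hb : pvHasDigit (PySem.List.pyGetD rulelist i "") with
          | false =>
              rw [if_pos rfl]
              have hA : simplify_pattern_fuel rulelist (rulelist.length + 1) i
                  = [PySem.List.pyGetD rulelist i ""] := by
                simp [simplify_pattern_fuel, hb]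
              refine ⟨hA.symm, ?_⟩
              intro k res hk
              by_cases hki : k = i
              · subst hki
                rw [PySem.Dict.get?_insert_self] at hk
                exact ⟨hval, hmemj0, by rw [← Option.some.inj hk, hA]⟩
              · rw [PySem.Dict.get?_insert_of_ne _ _ hki] at hk
                exact hinv _ _ hk
          | true =>
              rw [if_neg (by simp)]
              -- every token of every variation of this rule is a good reference
              have htokp : ∀ v ∈ pvSplit (PySem.List.pyGetD rulelist i "") " | ",
                  ∀ t ∈ pvSplit v " ", ∃ k : Int, PySem.Int.ofStr? t = some k ∧
                    pvValid rulelist.length k = true ∧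
                    pvNorm rulelist.length k ∈ pvRset rulelist j0 ∧
                    (pvRset rulelist (pvNorm rulelist.length k)).card ≤ c ∧
                    (pvRset rulelist (pvNorm rulelist.length k)).card ≤ g := by
                intro v hv' t ht
                rw [hv] at hb hv'
                obtain ⟨k, hk, hkval, hksucc⟩ := pvTok rulelist _ hself.1 hb hv' ht
                have hkRi : pvNorm rulelist.length k ∈ pvRset rulelist (pvNorm rulelist.length i) :=
                  pvSuccs_subset_Rset rulelist (pvMem_Rset_self rulelist _) _ hksucc
                have hcard : (pvRset rulelist (pvNorm rulelist.length k)).card <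
                    (pvRset rulelist (pvNorm rulelist.length i)).card :=
                  pvCard_lt rulelist hksucc (hself.2 _ hksucc)
                exact ⟨k, hk, hkval, pvRset_trans rulelist hmemj0 hkRi, by omega, by omega⟩
              have H : ∀ (i' : Int) (memo' : PySem.Dict Int (List String)), pvInv rulelist j0 memo' →
                  pvValid rulelist.length i' = true → pvNorm rulelist.length i' ∈ pvRset rulelist j0 →
                  (pvRset rulelist (pvNorm rulelist.length i')).card ≤ c →
                  (pvRset rulelist (pvNorm rulelist.length i')).card ≤ g →
                  (pvGo rulelist g memo' i').1 = simplify_pattern_fuel rulelist (rulelist.length + 1) i' ∧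
                  pvInv rulelist j0 (pvGo rulelist g memo' i').2 := by
                intro i' memo' h1 h2 h3 h4 h5
                exact ih i' memo' h1 h2 h3 h4 g h5
              obtain ⟨hfst, hinv'⟩ := pvB_varfold rulelist j0 g c H
                (pvSplit (PySem.List.pyGetD rulelist i "") " | ") [] memo hinv htokp
              rw [hfst]
              have hA : simplify_pattern_fuel rulelist (rulelist.length + 1) i
                  = (pvSplit (PySem.List.pyGetD rulelist i "") " | ").flatMap (fun v =>
                      (pvSplit v " ").foldl (fun combos t => combos.flatMap (fun c =>
                        (simplify_pattern_fuel rulelist (rulelist.length + 1)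
                          ((PySem.Int.ofStr? t).getD 0)).map (fun s => c ++ s))) [""]) := by
                rw [pvA_succ rulelist rulelist.length i, if_neg (by simp [hb])]
                apply List.flatMap_congr
                intro v hv'
                rw [pv_combos (fun t => simplify_pattern_fuel rulelist (rulelist.length + 1)
                  ((PySem.Int.ofStr? t).getD 0))]
                congr 1
                congr 1
                apply List.map_congr_left
                intro t ht
                obtain ⟨k, hk, hkval, hkj0, hkc, hkg⟩ := htokp v hv' t ht
                rw [hk]
                simp only [Option.getD_some]
                have hkn : pvNorm rulelist.length k < rulelist.length := pvNorm_lt _ _ hkval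
                have hkcard : (pvRset rulelist (pvNorm rulelist.length k)).card ≤ rulelist.length :=
                  pvRset_card_le rulelist hkn
                exact pvA_fuel rulelist ((pvRset rulelist (pvNorm rulelist.length k)).card) k hkval
                  (pvGood_mono rulelist hgood hkj0) (le_refl _) rulelist.length (rulelist.length + 1)
                  hkcard (by omega)
              rw [List.nil_append, ← hA]
              refine ⟨rfl, ?_⟩
              intro k res hk
              by_cases hki : k = i
              · subst hki
                rw [PySem.Dict.get?_insert_self] at hk
                refine ⟨hval, hmemj0, ?_⟩
                rw [← Option.some.inj hk]
              · rw [PySem.Dict.get?_insert_of_ne _ _ hki] at hk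
                exact hinv' _ _ hk

-- ===== VERDICT (by name: the statement is the Claim_ definition above) =====
theorem simplify_pattern_spec : Claim_equal_simplify_pattern := by
  intro rulelist idx _hdom hpre
  obtain ⟨hval, hrest⟩ := hpre
  unfold Spec_simplify_pattern simplify_pattern simplify_pattern_alt
  have hv := pvGetD_eq rulelist idx hval
  cases hb : pvHasDigit (rulelist.getD (pvNorm rulelist.length idx) "") with
  | false =>
      have hbp : pvHasDigit (PySem.List.pyGetD rulelist idx "") = false := by rw [hv]; exact hb
      rw [pvA_succ, if_pos hbp, pvGo_succ, PySem.Dict.get?_empty]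
      dsimp only
      rw [if_pos hbp]
  | true =>
      have hgood : pvGood rulelist (pvNorm rulelist.length idx) := fun m hm => hrest hb m hm
      have hlt := pvNorm_lt rulelist.length idx hval
      have hcard := pvRset_card_le rulelist hlt
      have hinv0 : pvInv rulelist (pvNorm rulelist.length idx) PySem.Dict.empty := by
        intro k res hk
        rw [PySem.Dict.get?_empty] at hk
        cases hk
      obtain ⟨h1, _⟩ := pvB_go rulelist (pvNorm rulelist.length idx) hgood
        ((pvRset rulelist (pvNorm rulelist.length idx)).card) idx PySem.Dict.empty hinv0 hval
        (pvMem_Rset_self rulelist _) (le_refl _) (rulelist.length + 1) (by omega)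
      exact h1.symm
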